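-- pv_equiv track=rewrite | github.com/ldydek/AGH-ASD | Exams/2020-2021/3. exam/2_1.task.py | removing_prefixes
-- ===== SOURCE A (Python) =====
-- def prefix(a, b):
--     for x in range(len(a)):
--         if a[x] != b[x]:
--             return False
--     return True
--
-- def removing_prefixes(tab):
--     n = len(tab)
--     tab.sort()
--     taken = [0] * n
--     for x in range(1, n):
--         if prefix(tab[x-1], tab[x]) is False:
--             taken[x-1] = 1
--     taken[n-1] = 1
--     solution = []
--     for x in range(n):
--         if taken[x] == 1:
--             solution.append(tab[x])
--     return solution
-- ===== SOURCE B (Python) =====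
-- def removing_prefixes(tab):
--     tab.sort()  # kept: A sorts tab in place and a caller could observe it
--     words = set(tab)
--     prefixes = {w[:k] for w in words for k in range(len(w))}
--     return sorted(v for v in words if v not in prefixes)
-- ===== Notes on version B (the rewrite author's own statement) =====
-- stated objective: alternative
-- what changed: Instead of marking a taken-array by char-by-char neighbor comparison over the sorted list and filtering by index, B builds the set of all proper prefixes of the words and returns, sorted, the distinct words not in that set; Pre_ excludes the empty list, on which A raises IndexError (taken[-1]).
import Mathlib
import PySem

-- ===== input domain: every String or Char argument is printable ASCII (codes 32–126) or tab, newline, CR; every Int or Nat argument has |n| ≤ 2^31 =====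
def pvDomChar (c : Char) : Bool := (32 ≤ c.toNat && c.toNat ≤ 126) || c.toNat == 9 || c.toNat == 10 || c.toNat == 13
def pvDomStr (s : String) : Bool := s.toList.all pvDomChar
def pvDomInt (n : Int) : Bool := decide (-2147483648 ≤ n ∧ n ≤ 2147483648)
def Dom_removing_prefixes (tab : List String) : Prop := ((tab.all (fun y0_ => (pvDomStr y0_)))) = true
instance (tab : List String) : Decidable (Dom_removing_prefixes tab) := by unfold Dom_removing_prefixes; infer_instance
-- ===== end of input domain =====

-- B replaces A's taken-array / neighbor-marking pass by a set-based rule (keep the words no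
-- other word strictly extends, sorted); both sort tab in place, the claim is about the return value.

-- ===== PORT A =====
-- prefix(a, b): for x in range(len(a)): if a[x] != b[x]: return False / return True,
-- walked in lockstep over the two char lists; none = IndexError (b[x] out of range), which
-- Python reaches exactly when b is a proper prefix of a (never between neighbors of a sorted list).
def prefixLoop : List Char → List Char → Option Bool
  | [], _ => some true
  | _ :: _, [] => none
  | c :: cs, d :: ds => if c ≠ d then some false else prefixLoop cs ds

def pyPrefix (a b : String) : Option Bool := prefixLoop a.toList b.toList

-- taken = [0] * n; for x in range(1, n): if prefix(tab[x-1], tab[x]) is False: taken[x-1] = 1.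
-- taken[x-1] is written exactly once, by iteration x, from the adjacent pair (tab[x-1], tab[x]);
-- the loop is walked as that pass over adjacent pairs, producing taken positionally.
def markLoop : List String → List Int
  | [] => []
  | [_] => [0]
  | a :: b :: t => (if pyPrefix a b = some false then 1 else 0) :: markLoop (b :: t)

-- taken[n-1] = 1  (raises IndexError when n = 0: excluded by Pre_)
def setLast : List Int → List Int
  | [] => []
  | [_] => [1]
  | a :: b :: t => a :: setLast (b :: t)

-- for x in range(n): if taken[x] == 1: solution.append(tab[x])  — lockstep over taken and tab
def solLoop : List Int → List String → List String
  | t :: ts, w :: ws => (if t = 1 then [w] else []) ++ solLoop ts ws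
  | _, _ => []

def removing_prefixes (tab : List String) : List String :=
  let s := PySem.List.sorted tab (fun x => x)   -- tab.sort()
  solLoop (setLast (markLoop s)) s

-- ===== PORT B =====
-- Source B: tab.sort() (mutation only); words = set(tab);
-- prefixes = {w[:k] for w in words for k in range(len(w))};
-- return sorted(v for v in words if v not in prefixes)
-- (the two set comprehensions iterate a set, but only sets are built from them and the
--  final sorted()/membership tests are order-independent, so the result is exact)
def removing_prefixes_alt (tab : List String) : List String :=
  let words : PySem.Set String := PySem.Set.ofList tab
  let prefixes : PySem.Set String :=
    PySem.Set.ofList (words.flatMap (fun w =>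
      (PySem.List.pyRange 0 (PySem.Str.len w) 1).map (fun k => PySem.Str.slice w none (some k))))
  PySem.List.sorted (words.filter (fun v => !(PySem.Set.contains prefixes v))) (fun x => x)

-- ===== PRECONDITION & SPEC =====
-- Pre_ excludes only the empty list, on which Python A raises IndexError at taken[n-1].
def Pre_removing_prefixes (tab : List String) : Prop := tab ≠ []
instance (tab : List String) : Decidable (Pre_removing_prefixes tab) := by
  unfold Pre_removing_prefixes; infer_instance
def pvWitness_removing_prefixes : List String := (["b", "a", "ab"])

def Spec_removing_prefixes (tab : List String) (out : List String) : Prop := out = removing_prefixes_alt tab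
instance (tab : List String) (out : List String) : Decidable (Spec_removing_prefixes tab out) := by unfold Spec_removing_prefixes; infer_instance

-- ===== CLAIM (what is proved, stated in full; the proofs are below) =====
def Claim_equal_removing_prefixes : Prop := ∀ (tab : List String), Dom_removing_prefixes tab → Pre_removing_prefixes tab → Spec_removing_prefixes tab (removing_prefixes tab)

-- ===== LEMMAS AND PROOFS =====

-- "v is strictly extended by some word of l": the tested condition in B's filter
def badOn (l : List String) (v : String) : Bool :=
  l.any (fun w => w != v && PySem.Str.startswith w v)

-- adjacent dedup of a list (used only as a proof-side description of both outputs)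
def dadj : List String → List String
  | [] => []
  | [a] => [a]
  | a :: b :: t => if a = b then dadj (b :: t) else a :: dadj (b :: t)

lemma mem_dadj : ∀ (l : List String) (x : String), x ∈ dadj l ↔ x ∈ l := by
  intro l
  induction l with
  | nil => intro x; simp [dadj]
  | cons a t ih =>
    intro x
    cases t with
    | nil => simp [dadj]
    | cons b t' =>
      by_cases hab : a = b
      · subst hab
        simp [dadj, ih x]
      · simp [dadj, hab, ih x]

lemma prefixLoop_self : ∀ u : List Char, prefixLoop u u = some true := by
  intro u; induction u with
  | nil => rfl
  | cons c cs ih => simp [prefixLoop, ih]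

lemma prefixLoop_true_iff : ∀ u v : List Char, prefixLoop u v = some true ↔ u <+: v := by
  intro u
  induction u with
  | nil => intro v; simp [prefixLoop]
  | cons c cs ih =>
    intro v
    cases v with
    | nil => simp [prefixLoop]
    | cons d ds =>
      by_cases hcd : c = d
      · subst hcd; simp [prefixLoop, ih, List.cons_prefix_cons]
      · simp [prefixLoop, hcd, List.cons_prefix_cons]

lemma prefixLoop_none : ∀ u v : List Char, prefixLoop u v = none → v <+: u ∧ v ≠ u := by
  intro u
  induction u with
  | nil => intro v h; simp [prefixLoop] at h
  | cons c cs ih =>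
    intro v
    cases v with
    | nil => intro _; exact ⟨List.nil_prefix, by simp⟩
    | cons d ds =>
      by_cases hcd : c = d
      · subst hcd
        intro h
        simp [prefixLoop] at h
        rcases ih ds h with ⟨h1, h2⟩
        exact ⟨List.cons_prefix_cons.mpr ⟨rfl, h1⟩, by simpa using h2⟩
      · intro h; simp [prefixLoop, hcd] at h

lemma lex_of_proper_prefix : ∀ u v : List Char, u <+: v → u ≠ v → List.Lex (· < ·) u v := by
  intro u
  induction u with
  | nil =>
    intro v _ hne
    cases v with
    | nil => exact absurd rfl hne
    | cons d ds => exact List.Lex.nil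
  | cons c cs ih =>
    intro v hp hne
    cases v with
    | nil => exact absurd hp (by simp)
    | cons d ds =>
      rcases List.cons_prefix_cons.mp hp with ⟨hcd, hp'⟩
      subst hcd
      exact List.Lex.cons (ih ds hp' (fun h => hne (by rw [h])))

lemma prefix_of_lex_chain :
    ∀ a b w : List Char, a <+: w →
      (List.Lex (· < ·) a b ∨ a = b) → (List.Lex (· < ·) b w ∨ b = w) → a <+: b := by
  intro a
  induction a with
  | nil => intro b w _ _ _; exact List.nil_prefix
  | cons c a1 ih =>
    intro b w hp hab hbw
    cases w with
    | nil => exact absurd hp (by simp)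
    | cons e w1 =>
      rcases List.cons_prefix_cons.mp hp with ⟨hce, hp'⟩
      subst hce
      cases b with
      | nil =>
        rcases hab with h | h
        · cases h
        · exact absurd h (by simp)
      | cons d b1 =>
        -- from a ≤ b and b ≤ w (lex) the head chars must agree: c = d
        have hcd : c = d ∧ (List.Lex (· < ·) a1 b1 ∨ a1 = b1) := by
          rcases hab with h | h
          · cases h with
            | rel hlt =>
              rcases hbw with h2 | h2
              · cases h2 with
                | rel hlt2 => exact absurd (lt_trans hlt hlt2) (lt_irrefl c)
                | cons h2' => exact absurd hlt (lt_irrefl _)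
              · obtain ⟨hdc, -⟩ := List.cons.inj h2
                rw [hdc] at hlt
                exact absurd hlt (lt_irrefl c)
            | cons h' => exact ⟨rfl, Or.inl h'⟩
          · rcases List.cons.inj h with ⟨h1, h2⟩
            exact ⟨h1, Or.inr h2⟩
        rcases hcd with ⟨hcd, hab1⟩
        subst hcd
        have hbw1 : List.Lex (· < ·) b1 w1 ∨ b1 = w1 := by
          rcases hbw with h | h
          · cases h with
            | rel hlt => exact absurd hlt (lt_irrefl _)
            | cons h' => exact Or.inl h'
          · rcases List.cons.inj h with ⟨_, h2⟩
            exact Or.inr h2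
        exact List.cons_prefix_cons.mpr ⟨rfl, ih b1 w1 hp' hab1 hbw1⟩

-- string ≤ as a lex-or-equal on the char lists
lemma le_toList (a b : String) (h : a ≤ b) :
    List.Lex (· < ·) a.toList b.toList ∨ a.toList = b.toList := by
  rcases lt_or_eq_of_le h with h' | h'
  · left
    have := String.lt_iff_toList_lt.mp h'
    exact (List.lt_iff_lex_lt _ _).mp this
  · right; rw [h']

lemma pyPrefix_false_iff (a b : String) (h : a ≤ b) :
    pyPrefix a b = some false ↔ ¬ (a.toList <+: b.toList) := by
  cases hv : prefixLoop a.toList b.toList with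
  | none =>
    exfalso
    rcases prefixLoop_none _ _ hv with ⟨h1, h2⟩
    have hlt : List.Lex (· < ·) b.toList a.toList := lex_of_proper_prefix _ _ h1 h2
    have : b < a := String.lt_iff_toList_lt.mpr ((List.lt_iff_lex_lt _ _).mpr hlt)
    exact absurd this (not_lt.mpr h)
  | some bv =>
    cases bv with
    | true =>
      have := (prefixLoop_true_iff a.toList b.toList).mp hv
      simp [pyPrefix, hv, this]
    | false =>
      have : ¬ a.toList <+: b.toList := by
        intro hp
        have := (prefixLoop_true_iff a.toList b.toList).mpr hp
        rw [hv] at this; exact absurd this (by simp)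
      simp [pyPrefix, hv, this]

lemma head_witness_false (a v : String) (h : a ≤ v) :
    (a != v && PySem.Str.startswith a v) = false := by
  by_cases hav : a = v
  · subst hav; simp
  · have hsw : PySem.Chars.startswith a.toList v.toList = false := by
      cases hx : PySem.Chars.startswith a.toList v.toList with
      | false => rfl
      | true =>
        exfalso
        have hp : v.toList <+: a.toList := (PySem.Chars.startswith_iff _ _).mp hx
        have hne : v.toList ≠ a.toList := fun he => hav (String.toList_inj.mp he).symm
        have hvlt : v < a := String.lt_iff_toList_lt.mpr
          ((List.lt_iff_lex_lt _ _).mpr (lex_of_proper_prefix _ _ hp hne))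
        exact absurd (lt_of_le_of_lt h hvlt) (lt_irrefl a)
    simp [PySem.Str.startswith_eq, hsw]

lemma badOn_cons_of_le (a v : String) (l : List String) (h : a ≤ v) :
    badOn (a :: l) v = badOn l v := by
  simp only [badOn, List.any_cons, head_witness_false a v h, Bool.false_or]

lemma badOn_iff (l : List String) (v : String) :
    badOn l v = true ↔ ∃ w ∈ l, w ≠ v ∧ v.toList <+: w.toList := by
  unfold badOn
  rw [List.any_eq_true]
  constructor
  · rintro ⟨w, hw, hcond⟩
    obtain ⟨hne, hsw⟩ : (w != v) = true ∧ PySem.Str.startswith w v = true := by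
      simpa using hcond
    rw [PySem.Str.startswith_eq] at hsw
    exact ⟨w, hw, by simpa using hne, (PySem.Chars.startswith_iff _ _).mp hsw⟩
  · rintro ⟨w, hw, hne, hpfx⟩
    refine ⟨w, hw, ?_⟩
    have h1 : (w != v) = true := by simpa using hne
    have h2 : PySem.Chars.startswith w.toList v.toList = true :=
      (PySem.Chars.startswith_iff _ _).mpr hpfx
    simp [h1, PySem.Str.startswith_eq, h2]

-- v is in B's prefix set exactly when some word of tab strictly extends v
lemma contains_prefixes_iff (tab : List String) (v : String) :
    PySem.Set.contains
      (PySem.Set.ofList ((PySem.Set.ofList tab).flatMap (fun w =>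
        (PySem.List.pyRange 0 (PySem.Str.len w) 1).map (fun k => PySem.Str.slice w none (some k))))) v = true
    ↔ ∃ w ∈ tab, w ≠ v ∧ v.toList <+: w.toList := by
  rw [PySem.Set.contains_iff, PySem.Set.mem_ofList, List.mem_flatMap]
  constructor
  · rintro ⟨w, hw, hv⟩
    rw [PySem.Set.mem_ofList] at hw
    rcases List.mem_map.mp hv with ⟨k, hk, hkv⟩
    rcases PySem.List.mem_pyRange_one.mp hk with ⟨hk0, hklt⟩
    have hlen : PySem.Str.len w = (w.toList.length : Int) := by simp
    have hvl : v.toList = w.toList.take k.toNat := by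
      rw [← hkv]
      simp [PySem.Str.slice, PySem.List.slice_to _ hk0]
    refine ⟨w, hw, ?_, hvl ▸ List.take_prefix _ _⟩
    intro hwv
    subst hwv
    have : w.toList.length ≤ k.toNat := by
      have := congrArg List.length hvl
      simpa [min_le_iff] using this.le
    rw [hlen] at hklt
    omega
  · rintro ⟨w, hw, hne, hpfx⟩
    have hlt : v.toList.length < w.toList.length := by
      rcases lt_or_eq_of_le hpfx.length_le with h | h
      · exact h
      · exact absurd (String.toList_inj.mp (hpfx.eq_of_length h)).symm hne
    have hlen : PySem.Str.len w = (w.toList.length : Int) := by simp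
    refine ⟨w, (PySem.Set.mem_ofList tab w).mpr hw, List.mem_map.mpr
      ⟨(v.toList.length : Int), PySem.List.mem_pyRange_one.mpr
        ⟨by omega, by rw [hlen]; exact_mod_cast hlt⟩, ?_⟩⟩
    apply String.toList_inj.mp
    have hsl : (PySem.Str.slice w none (some (v.toList.length : Int))).toList
        = w.toList.take v.toList.length := by
      simp [PySem.Str.slice]
    rw [hsl]
    exact (List.prefix_iff_eq_take.mp hpfx).symm

lemma badOn_head (a b : String) (t : List String)
    (hab : a ≠ b) (hpw : (a :: b :: t).Pairwise (· ≤ ·)) :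
    badOn (a :: b :: t) a = true ↔ a.toList <+: b.toList := by
  rcases List.pairwise_cons.mp hpw with ⟨hall, hpw'⟩
  rcases List.pairwise_cons.mp hpw' with ⟨hball, _⟩
  constructor
  · intro hbad
    rcases List.any_eq_true.mp hbad with ⟨w, hw, hcond⟩
    obtain ⟨hne, hsw⟩ : (w != a) = true ∧ PySem.Str.startswith w a = true := by
      simpa using hcond
    have hwa : w ≠ a := by simpa using hne
    rw [PySem.Str.startswith_eq] at hsw
    have hpfx : a.toList <+: w.toList := (PySem.Chars.startswith_iff _ _).mp hsw
    rcases List.mem_cons.mp hw with hw1 | hw2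
    · exact absurd hw1 hwa
    · have hbw : b ≤ w := by
        rcases List.mem_cons.mp hw2 with h1 | h2
        · exact le_of_eq h1.symm
        · exact hball w h2
      have h1 : a ≤ b := hall b (List.mem_cons_self ..)
      exact prefix_of_lex_chain a.toList b.toList w.toList hpfx
        (le_toList a b h1) (le_toList b w hbw)
  · intro hpfx
    apply List.any_eq_true.mpr
    refine ⟨b, by simp, ?_⟩
    have h1 : (b != a) = true := by simpa using fun h => hab h.symm
    have h2 : PySem.Chars.startswith b.toList a.toList = true :=
      (PySem.Chars.startswith_iff _ _).mpr hpfx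
    simp [h1, PySem.Str.startswith_eq, h2]

lemma markLoop_ne_nil (x : String) (l : List String) : markLoop (x :: l) ≠ [] := by
  cases l <;> simp [markLoop]

lemma setLast_cons (m : Int) (l : List Int) (h : l ≠ []) :
    setLast (m :: l) = m :: setLast l := by
  cases l with
  | nil => exact absurd rfl h
  | cons _ _ => rfl

lemma main_filter : ∀ s : List String, s.Pairwise (· ≤ ·) →
    solLoop (setLast (markLoop s)) s = (dadj s).filter (fun v => !(badOn s v)) := by
  intro s
  induction s with
  | nil => intro _; rfl
  | cons a rest ih =>
    intro hpw
    cases rest with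
    | nil =>
      simp [markLoop, setLast, solLoop, dadj, badOn]
    | cons b t =>
      rcases List.pairwise_cons.mp hpw with ⟨hall, hpw'⟩
      have hab : a ≤ b := hall b (List.mem_cons_self ..)
      have hmark : markLoop (a :: b :: t) =
          (if pyPrefix a b = some false then (1 : Int) else 0) :: markLoop (b :: t) := rfl
      have hset : setLast ((if pyPrefix a b = some false then (1 : Int) else 0) :: markLoop (b :: t)) =
          (if pyPrefix a b = some false then (1 : Int) else 0) :: setLast (markLoop (b :: t)) :=
        setLast_cons _ _ (markLoop_ne_nil b t)
      have hstep : solLoop (setLast (markLoop (a :: b :: t))) (a :: b :: t) =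
          (if (if pyPrefix a b = some false then (1 : Int) else 0) = 1 then [a] else []) ++
            solLoop (setLast (markLoop (b :: t))) (b :: t) := by
        rw [hmark, hset]; rfl
      -- transport the filter predicate from a :: b :: t to b :: t on members of dadj (b :: t)
      have htrans : (dadj (b :: t)).filter (fun v => !(badOn (a :: b :: t) v)) =
          (dadj (b :: t)).filter (fun v => !(badOn (b :: t) v)) := by
        apply List.filter_congr
        intro x hx
        have hxmem : x ∈ b :: t := (mem_dadj _ x).mp hx
        rw [badOn_cons_of_le a x _ (hall x hxmem)]
      by_cases heq : a = b
      · -- duplicate head: A drops a (prefix(a,a) is True) and dadj drops a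
        subst heq
        have hpy : pyPrefix a a = some true := prefixLoop_self a.toList
        have : (if pyPrefix a a = some false then (1 : Int) else 0) = 0 := by simp [hpy]
        rw [hstep, this]
        simp only [if_neg (by norm_num : ¬ (0 : Int) = 1), List.nil_append]
        rw [ih hpw', show dadj (a :: a :: t) = dadj (a :: t) from by simp [dadj], ← htrans]
      · -- distinct head: A keeps a iff prefix(a,b) is False iff nothing in the list extends a
        have hdadj : dadj (a :: b :: t) = a :: dadj (b :: t) := by simp [dadj, heq]
        rw [hstep, ih hpw', hdadj, ← htrans, List.filter_cons]
        by_cases hp : a.toList <+: b.toList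
        · have h1 : pyPrefix a b ≠ some false := fun hc =>
            absurd hp ((pyPrefix_false_iff a b hab).mp hc)
          have h2 : badOn (a :: b :: t) a = true := (badOn_head a b t heq hpw).mpr hp
          simp [h1, h2]
        · have h1 : pyPrefix a b = some false := (pyPrefix_false_iff a b hab).mpr hp
          have h2 : badOn (a :: b :: t) a = false := by
            cases hx : badOn (a :: b :: t) a
            · rfl
            · exact absurd ((badOn_head a b t heq hpw).mp hx) hp
          simp [h1, h2]

lemma dadj_pairwise_lt : ∀ s : List String, s.Pairwise (· ≤ ·) →
    (dadj s).Pairwise (· < ·) := by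
  intro s
  induction s with
  | nil => intro _; simp [dadj]
  | cons a rest ih =>
    intro hpw
    rcases List.pairwise_cons.mp hpw with ⟨hall, hpw'⟩
    cases rest with
    | nil => simp [dadj]
    | cons b t =>
      by_cases heq : a = b
      · subst heq
        simpa [dadj] using ih hpw'
      · have : dadj (a :: b :: t) = a :: dadj (b :: t) := by simp [dadj, heq]
        rw [this]
        apply List.pairwise_cons.mpr
        refine ⟨?_, ih hpw'⟩
        intro x hx
        have hxmem : x ∈ b :: t := (mem_dadj _ x).mp hx
        have hax : a ≤ x := hall x hxmem
        have hbx : b ≤ x := by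
          rcases List.mem_cons.mp hxmem with h1 | h2
          · exact le_of_eq h1.symm
          · exact (List.pairwise_cons.mp hpw').1 x h2
        rcases lt_or_eq_of_le hax with h | h
        · exact h
        · exfalso
          have hab : a < b := lt_of_le_of_ne (hall b (List.mem_cons_self ..)) heq
          rw [h] at hab
          exact absurd (lt_of_lt_of_le hab hbx) (lt_irrefl x)

lemma ports_eq (tab : List String) : removing_prefixes tab = removing_prefixes_alt tab := by
  have hpw : (PySem.List.sorted tab (fun x => x)).Pairwise (· ≤ ·) := by
    simpa using PySem.List.sorted_pairwise tab (fun x => x)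
  show solLoop (setLast (markLoop (PySem.List.sorted tab (fun x => x))))
        (PySem.List.sorted tab (fun x => x)) = _
  rw [main_filter _ hpw]
  have hmemS : ∀ x : String, x ∈ PySem.List.sorted tab (fun x => x) ↔ x ∈ tab :=
    fun x => PySem.List.mem_sorted tab (fun x => x) false x
  have hmemW : ∀ x : String, x ∈ PySem.Set.ofList tab ↔ x ∈ tab :=
    fun x => PySem.Set.mem_ofList tab x
  -- B's "v not in prefixes" test equals the negation of badOn over the sorted list
  have hpred : ∀ v, (!(PySem.Set.contains
      (PySem.Set.ofList ((PySem.Set.ofList tab).flatMap (fun w =>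
        (PySem.List.pyRange 0 (PySem.Str.len w) 1).map (fun k => PySem.Str.slice w none (some k))))) v))
      = (!(badOn (PySem.List.sorted tab (fun x => x)) v)) := by
    intro v
    have h1 := contains_prefixes_iff tab v
    have h2 := badOn_iff (PySem.List.sorted tab (fun x => x)) v
    have h2' : badOn (PySem.List.sorted tab (fun x => x)) v = true ↔
        ∃ w ∈ tab, w ≠ v ∧ v.toList <+: w.toList := by
      rw [h2]
      constructor
      · rintro ⟨w, hw, hp⟩; exact ⟨w, (hmemS w).mp hw, hp⟩
      · rintro ⟨w, hw, hp⟩; exact ⟨w, (hmemS w).mpr hw, hp⟩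
    congr 1
    cases hb : badOn (PySem.List.sorted tab (fun x => x)) v with
    | true => exact h1.mpr (h2'.mp hb)
    | false =>
      cases hc : PySem.Set.contains
        (PySem.Set.ofList ((PySem.Set.ofList tab).flatMap (fun w =>
          (PySem.List.pyRange 0 (PySem.Str.len w) 1).map (fun k => PySem.Str.slice w none (some k))))) v with
      | false => rfl
      | true => exact absurd (h2'.mpr (h1.mp hc)) (by simp [hb])
  have hnd1 : ((dadj (PySem.List.sorted tab (fun x => x))).filter
      (fun v => !(badOn (PySem.List.sorted tab (fun x => x)) v))).Nodup :=
    List.Sublist.nodup List.filter_sublist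
      (List.Pairwise.imp ne_of_lt (dadj_pairwise_lt _ hpw))
  have hnd2 : ((PySem.Set.ofList tab).filter
      (fun v => !(badOn (PySem.List.sorted tab (fun x => x)) v))).Nodup :=
    List.Sublist.nodup List.filter_sublist (PySem.Set.nodup_ofList tab)
  show _ = PySem.List.sorted
    ((PySem.Set.ofList tab).filter (fun v => !(PySem.Set.contains
      (PySem.Set.ofList ((PySem.Set.ofList tab).flatMap (fun w =>
        (PySem.List.pyRange 0 (PySem.Str.len w) 1).map (fun k => PySem.Str.slice w none (some k))))) v)))
    (fun x => x)
  rw [List.filter_congr (fun x _ => hpred x)]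
  symm
  apply PySem.List.sorted_eq_of_perm_of_pairwise_lt
  · apply (List.perm_ext_iff_of_nodup hnd1 hnd2).mpr
    intro x
    simp only [List.mem_filter]
    constructor
    · rintro ⟨hx, hb⟩
      exact ⟨(hmemW x).mpr ((hmemS x).mp ((mem_dadj _ x).mp hx)), hb⟩
    · rintro ⟨hx, hb⟩
      exact ⟨(mem_dadj _ x).mpr ((hmemS x).mpr ((hmemW x).mp hx)), hb⟩
  · simpa using List.Pairwise.filter _ (dadj_pairwise_lt _ hpw)

-- ===== VERDICT (by name: the statement is the Claim_ definition above) =====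
theorem removing_prefixes_spec : Claim_equal_removing_prefixes := by
  intro tab _ _
  exact ports_eq tab
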